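-- pv_equiv track=rewrite | github.com/Grey1991/COMP9021-Python | Lab/Lab_6/q3(myself).py | solution
-- ===== SOURCE A (Python) =====
-- def solution(word):
--     L = list(word)
--     if len(L) == 1:
--         return word
--     solution = ''
--     for i in range(len(L)-1):
--         current = ord(L[i])
--         current_string = L[i]
--         for j in range(i+1,len(L)):
--             if ord(L[j]) == current+1:
--                 current += 1
--                 current_string += L[j]
--         if len(current_string) > len(solution):
--             solution = current_string
--     return solution
-- ===== SOURCE B (Python) =====
-- def solution(word):
--     # O(n): right-to-left pass builds, for each position i, the nearest index j > i
--     # holding the next character value, plus the chain length; then one argmax and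
--     # one reconstruction walk.
--     n = len(word)
--     if n <= 1:
--         return word
--     info = {}   # i -> (next index or None, chain length from i)
--     last = {}   # char code -> nearest index to the right with that code
--     for i in range(n - 1, -1, -1):
--         c = ord(word[i])
--         j = last.get(c + 1)
--         if j is None:
--             info[i] = (None, 1)
--         else:
--             info[i] = (j, 1 + info[j][1])
--         last[c] = i
--     best = 0
--     for i in range(1, n - 1):
--         if info[i][1] > info[best][1]:
--             best = i
--     out = []
--     i = best
--     while i is not None:
--         out.append(word[i])
--         i = info[i][0]
--     return ''.join(out)
-- ===== Notes on version B (the rewrite author's own statement) =====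
-- stated objective: faster
-- what changed: A restarts a greedy forward rescan at every index (O(n^2)); B does one right-to-left pass building nearest-next-index and chain-length tables keyed by character code, then picks the first argmax and walks the chain once (O(n)).
import Mathlib
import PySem

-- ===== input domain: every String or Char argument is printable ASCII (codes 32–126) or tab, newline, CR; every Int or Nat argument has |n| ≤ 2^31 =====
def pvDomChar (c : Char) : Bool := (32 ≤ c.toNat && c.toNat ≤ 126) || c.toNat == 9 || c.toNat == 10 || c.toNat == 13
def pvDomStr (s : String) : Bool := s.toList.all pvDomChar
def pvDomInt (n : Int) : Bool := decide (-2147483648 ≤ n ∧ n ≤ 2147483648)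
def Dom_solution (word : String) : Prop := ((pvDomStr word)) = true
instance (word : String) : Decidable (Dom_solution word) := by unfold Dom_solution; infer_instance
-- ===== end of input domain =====

-- B replaces A's quadratic start-at-every-index rescan by a single right-to-left pass
-- building nearest-next-index and chain-length tables, an argmax, and one chain walk (objective: faster).

-- ===== PORT A =====
-- inner loop of A: scan j = i+1 .. len-1, greedily extending (current, current_string)
def stepA (L : List Char) (st : Nat × List Char) (j : Nat) : Nat × List Char :=
  if (L.getD j ' ').toNat = st.1 + 1 then (st.1 + 1, st.2 ++ [L.getD j ' ']) else st

def innerA (L : List Char) (i : Nat) : Nat × List Char :=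
  (List.range' (i+1) (L.length - (i+1))).foldl (stepA L) ((L.getD i ' ').toNat, [L.getD i ' '])

def solution (word : String) : String :=
  let L := word.toList
  if L.length = 1 then word
  else
    String.ofList ((List.range (L.length - 1)).foldl
      (fun sol i => if (innerA L i).2.length > sol.length then (innerA L i).2 else sol) [])

-- ===== PORT B =====
-- one right-to-left step of Source B's table-building loop: info[i] = (next index, chain length), last[ord] = i
def stepB (L : List Char)
    (st : PySem.Dict Nat (Option Nat × Nat) × PySem.Dict Nat Nat) (i : Nat) :
    PySem.Dict Nat (Option Nat × Nat) × PySem.Dict Nat Nat :=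
  let c := (L.getD i ' ').toNat
  let entry : Option Nat × Nat :=
    match st.2.get? (c + 1) with
    | none => (none, 1)
    | some j => (some j, 1 + (st.1.getD j (none, 1)).2)
  (st.1.insert i entry, st.2.insert c i)

def buildB (L : List Char) : PySem.Dict Nat (Option Nat × Nat) × PySem.Dict Nat Nat :=
  ((List.range L.length).reverse).foldl (stepB L) (PySem.Dict.empty, PySem.Dict.empty)

-- Source B's final while-loop (follows next pointers; fuel = n always suffices)
def rebuildB (info : PySem.Dict Nat (Option Nat × Nat)) (L : List Char) : Nat → Nat → List Char
  | 0, _ => []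
  | fuel+1, i =>
    L.getD i ' ' :: (match (info.getD i (none, 1)).1 with
      | none => []
      | some j => rebuildB info L fuel j)

def solution_alt (word : String) : String :=
  let L := word.toList
  let n := L.length
  if n ≤ 1 then word
  else
    let info := (buildB L).1
    let best := (List.range' 1 (n - 2)).foldl
      (fun best i => if (info.getD i (none, 1)).2 > (info.getD best (none, 1)).2 then i else best) 0
    String.ofList (rebuildB info L n best)

-- ===== PRECONDITION & SPEC =====
def Spec_solution (word : String) (out : String) : Prop := out = solution_alt word
instance (word : String) (out : String) : Decidable (Spec_solution word out) := by unfold Spec_solution; infer_instance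

-- ===== CLAIM (what is proved, stated in full; the proofs are below) =====
def Claim_equal_solution : Prop := ∀ (word : String), Dom_solution word → Spec_solution word (solution word)

-- ===== LEMMAS AND PROOFS =====

-- first index j ≥ s with ord L[j] = v
def findFrom (L : List Char) (v : Nat) (s : Nat) : Option Nat :=
  if h : s < L.length then
    (if (L.getD s ' ').toNat = v then some s else findFrom L v (s+1))
  else none
termination_by L.length - s

-- nearest strictly-later index holding the next character value
def nextIdx (L : List Char) (i : Nat) : Option Nat :=
  findFrom L ((L.getD i ' ').toNat + 1) (i+1)

theorem findFrom_some_aux (L : List Char) (v : Nat) :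
    ∀ k s j, L.length - s ≤ k → findFrom L v s = some j →
    s ≤ j ∧ j < L.length ∧ (L.getD j ' ').toNat = v := by
  intro k
  induction k with
  | zero =>
      intro s j hk h
      rw [findFrom, dif_neg (by omega)] at h
      exact absurd h (by simp)
  | succ k ih =>
      intro s j hk h
      rw [findFrom] at h
      by_cases hs : s < L.length
      · rw [dif_pos hs] at h
        by_cases hc : (L.getD s ' ').toNat = v
        · rw [if_pos hc] at h
          injection h with h
          subst h
          exact ⟨le_refl _, hs, hc⟩
        · rw [if_neg hc] at h
          have := ih (s+1) j (by omega) h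
          exact ⟨by omega, this.2.1, this.2.2⟩
      · rw [dif_neg hs] at h
        exact absurd h (by simp)

theorem findFrom_some {L : List Char} {v s j : Nat} (h : findFrom L v s = some j) :
    s ≤ j ∧ j < L.length ∧ (L.getD j ' ').toNat = v :=
  findFrom_some_aux L v (L.length - s) s j (le_refl _) h

theorem nextIdx_some {L : List Char} {i j : Nat} (h : nextIdx L i = some j) :
    i < j ∧ j < L.length ∧ (L.getD j ' ').toNat = (L.getD i ' ').toNat + 1 := by
  have := findFrom_some h
  exact ⟨by omega, this.2.1, this.2.2⟩

-- the greedy chain of indices starting at i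
def chainIdx (L : List Char) (i : Nat) : List Nat :=
  i :: (match h : nextIdx L i with
        | none => []
        | some j => chainIdx L j)
termination_by L.length - i
decreasing_by
  have := nextIdx_some h; omega

def chainChars (L : List Char) (i : Nat) : List Char :=
  (chainIdx L i).map (fun j => L.getD j ' ')

def glen (L : List Char) (i : Nat) : Nat := (chainIdx L i).length

theorem chainIdx_eq_none {L : List Char} {i : Nat} (h : nextIdx L i = none) :
    chainIdx L i = [i] := by
  rw [chainIdx]; split <;> simp_all

theorem chainIdx_eq_some {L : List Char} {i j : Nat} (h : nextIdx L i = some j) :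
    chainIdx L i = i :: chainIdx L j := by
  rw [chainIdx]
  congr 1
  split <;> simp_all

-- the tail A's inner loop collects, as a recursion on the first matching index
def collect (L : List Char) (cur s : Nat) : List Char :=
  match h : findFrom L (cur+1) s with
  | none => []
  | some j => L.getD j ' ' :: collect L (cur+1) (j+1)
termination_by L.length - s
decreasing_by
  have := findFrom_some h; omega

theorem collect_eq_none {L : List Char} {cur s : Nat} (h : findFrom L (cur+1) s = none) :
    collect L cur s = [] := by
  rw [collect]; split <;> simp_all

theorem chainChars_cons {L : List Char} {i j : Nat} (h : nextIdx L i = some j) :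
    chainChars L i = L.getD i ' ' :: chainChars L j := by
  rw [chainChars, chainIdx_eq_some h, List.map_cons, chainChars]

theorem collect_eq_some {L : List Char} {cur s j : Nat} (h : findFrom L (cur+1) s = some j) :
    collect L cur s = L.getD j ' ' :: collect L (cur+1) (j+1) := by
  rw [collect]
  split <;> simp_all

-- A's inner fold collects exactly `collect`
theorem innerFold (L : List Char) :
    ∀ k s cur acc, L.length - s = k →
    ((List.range' s (L.length - s)).foldl (stepA L) (cur, acc)).2 = acc ++ collect L cur s := by
  intro k
  induction k with
  | zero =>
      intro s cur acc h
      rw [h, collect_eq_none]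
      · simp
      · rw [findFrom, dif_neg (by omega)]
  | succ k ih =>
      intro s cur acc h
      have hs : s < L.length := by omega
      rw [h, List.range'_succ, List.foldl_cons]
      by_cases hc : (L.getD s ' ').toNat = cur + 1
      · have hf : findFrom L (cur+1) s = some s := by
          rw [findFrom, dif_pos hs, if_pos hc]
        rw [collect_eq_some hf]
        have : stepA L (cur, acc) s = (cur + 1, acc ++ [L.getD s ' ']) := by
          simp only [stepA]
          rw [if_pos hc]
        rw [this]
        have h2 : L.length - (s+1) = k := by omega
        have := ih (s+1) (cur+1) (acc ++ [L.getD s ' ']) h2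
        rw [h2] at this
        rw [this]
        simp
      · have hf : findFrom L (cur+1) s = findFrom L (cur+1) (s+1) := by
          rw [findFrom, dif_pos hs, if_neg hc]
        have hcol : collect L cur s = collect L cur (s+1) := by
          cases hx : findFrom L (cur+1) (s+1) with
          | none => rw [collect_eq_none (hf.trans hx), collect_eq_none hx]
          | some j => rw [collect_eq_some (hf.trans hx), collect_eq_some hx]
        have : stepA L (cur, acc) s = (cur, acc) := by
          simp only [stepA]
          rw [if_neg hc]
        rw [this]
        have h2 : L.length - (s+1) = k := by omega
        have := ih (s+1) cur acc h2
        rw [h2] at this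
        rw [this, hcol]

-- A's per-start candidate equals the greedy chain
theorem innerA_eq_chainChars (L : List Char) :
    ∀ k i, L.length - i = k → (innerA L i).2 = chainChars L i := by
  intro k
  induction k using Nat.strong_induction_on with
  | _ k ih =>
      intro i hk
      unfold innerA
      rw [innerFold L (L.length - (i+1)) (i+1) _ _ rfl]
      cases h : nextIdx L i with
      | none =>
          rw [collect_eq_none h, chainChars, chainIdx_eq_none h]; simp
      | some j =>
          have hj := nextIdx_some h
          rw [collect_eq_some h]
          have hcur : (L.getD i ' ').toNat + 1 = (L.getD j ' ').toNat := hj.2.2.symm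
          have htail := ih (L.length - j) (by omega) j rfl
          unfold innerA at htail
          rw [innerFold L (L.length - (j+1)) (j+1) _ _ rfl] at htail
          rw [List.singleton_append] at htail
          rw [List.singleton_append, hcur, htail, chainChars, chainChars, chainIdx_eq_some h]
          simp

-- length of the candidate string = glen
theorem length_chainChars (L : List Char) (i : Nat) :
    (chainChars L i).length = glen L i := by
  simp [chainChars, glen]

theorem chainChars_ne_nil (L : List Char) (i : Nat) : chainChars L i ≠ [] := by
  rw [chainChars, chainIdx]; simp

-- ===== B-side table invariant =====

theorem buildB_inv (L : List Char) :
    ∀ m, m ≤ L.length →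
    (∀ v, (((List.range' (L.length - m) m).reverse).foldl (stepB L)
        (PySem.Dict.empty, PySem.Dict.empty)).2.get? v = findFrom L v (L.length - m)) ∧
    (∀ j, L.length - m ≤ j → j < L.length →
      (((List.range' (L.length - m) m).reverse).foldl (stepB L)
        (PySem.Dict.empty, PySem.Dict.empty)).1.get? j = some (nextIdx L j, glen L j)) := by
  intro m
  induction m with
  | zero =>
      intro _
      constructor
      · intro v
        simp [PySem.Dict.get?_empty]
        rw [findFrom]; simp
      · intro j h1 h2; omega
  | succ m ih =>
      intro hm
      have ihm := ih (by omega)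
      set k := L.length - (m+1) with hkdef
      have hk1 : L.length - m = k + 1 := by omega
      have hkn : k < L.length := by omega
      rw [hk1] at ihm
      have hsplit : List.range' k (m+1) = k :: List.range' (k+1) m := by rw [List.range'_succ]
      rw [hsplit]
      simp only [List.reverse_cons, List.foldl_concat]
      set prev := ((List.range' (k+1) m).reverse).foldl (stepB L)
        (PySem.Dict.empty, PySem.Dict.empty) with hprev
      have hlast := ihm.1
      have hinfo := ihm.2
      -- the entry computed at k
      have hentry :
          (match prev.2.get? ((L.getD k ' ').toNat + 1) with
            | none => ((none : Option Nat), 1)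
            | some j => (some j, 1 + (prev.1.getD j ((none : Option Nat), 1)).2))
          = (nextIdx L k, glen L k) := by
        rw [hlast]
        cases h : nextIdx L k with
        | none =>
            rw [show findFrom L ((L.getD k ' ').toNat + 1) (k+1) = none from h]
            dsimp only
            simp [glen, chainIdx_eq_none h]
        | some j =>
            have hj := nextIdx_some h
            rw [show findFrom L ((L.getD k ' ').toNat + 1) (k+1) = some j from h]
            dsimp only
            have hgd : prev.1.getD j ((none : Option Nat), 1) = (nextIdx L j, glen L j) := by
              rw [PySem.Dict.getD_eq_get?_getD, hinfo j (by omega) hj.2.1]; rfl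
            rw [hgd]
            simp [glen, chainIdx_eq_some h, Nat.add_comm]
      constructor
      · intro v
        show (prev.2.insert (L.getD k ' ').toNat k).get? v = findFrom L v k
        rw [PySem.Dict.get?_insert, findFrom, dif_pos hkn]
        by_cases hv : v = (L.getD k ' ').toNat
        · rw [if_pos hv, if_pos hv.symm]
        · rw [if_neg hv, if_neg (fun hh => hv hh.symm), hlast]
      · intro j hj1 hj2
        show (prev.1.insert k
          (match prev.2.get? ((L.getD k ' ').toNat + 1) with
            | none => ((none : Option Nat), 1)
            | some j => (some j, 1 + (prev.1.getD j ((none : Option Nat), 1)).2))).get? j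
          = some (nextIdx L j, glen L j)
        rw [PySem.Dict.get?_insert, hentry]
        by_cases hjk : j = k
        · simp [hjk]
        · simp [hjk]
          exact hinfo j (by omega) hj2

theorem buildB_get (L : List Char) {j : Nat} (hj : j < L.length) :
    (buildB L).1.getD j (none, 1) = (nextIdx L j, glen L j) := by
  have := (buildB_inv L L.length (le_refl _)).2 j (by omega) hj
  rw [buildB, List.range_eq_range']
  rw [show L.length - L.length = 0 from by omega] at this
  rw [PySem.Dict.getD_eq_get?_getD, this]
  rfl

-- rebuild walks the chain
theorem rebuildB_eq (L : List Char) :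
    ∀ fuel i, i < L.length → L.length - i ≤ fuel →
    rebuildB (buildB L).1 L fuel i = chainChars L i := by
  intro fuel
  induction fuel with
  | zero => intro i h1 h2; omega
  | succ fuel ih =>
      intro i h1 h2
      rw [rebuildB, buildB_get L h1]
      cases h : nextIdx L i with
      | none => rw [chainChars, chainIdx_eq_none h]; simp
      | some j =>
          have hj := nextIdx_some h
          simp only
          rw [ih j hj.2.1 (by omega), chainChars_cons h]

-- the argmax fold over indices tracks A's longest-string fold
theorem select_eq (L : List Char) :
    ∀ (is : List Nat) (b : Nat),
    is.foldl (fun sol i => if (chainChars L i).length > sol.length then chainChars L i else sol)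
      (chainChars L b)
    = chainChars L (is.foldl (fun best i => if glen L i > glen L best then i else best) b) := by
  intro is
  induction is with
  | nil => intro b; rfl
  | cons i is ih =>
      intro b
      simp only [List.foldl_cons]
      rw [length_chainChars, length_chainChars]
      by_cases hc : glen L i > glen L b
      · rw [if_pos hc, if_pos hc, ih]
      · rw [if_neg hc, if_neg hc, ih]

-- B's best-index fold reads glen through the table
theorem bestfold_eq (L : List Char) :
    ∀ (is : List Nat), (∀ i ∈ is, i < L.length) → ∀ b, b < L.length →
    is.foldl (fun best i =>
        if ((buildB L).1.getD i (none,1)).2 > ((buildB L).1.getD best (none,1)).2 then i else best) b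
    = is.foldl (fun best i => if glen L i > glen L best then i else best) b := by
  intro is
  induction is with
  | nil => intro _ b _; rfl
  | cons i is ih =>
      intro hmem b hb
      simp only [List.foldl_cons]
      rw [buildB_get L (hmem i (by simp)), buildB_get L hb]
      simp only
      by_cases hc : glen L i > glen L b
      · rw [if_pos hc]
        exact ih (fun x hx => hmem x (by simp [hx])) i (hmem i (by simp))
      · rw [if_neg hc]
        exact ih (fun x hx => hmem x (by simp [hx])) b hb

theorem bestfold_lt (L : List Char) :
    ∀ (is : List Nat), (∀ i ∈ is, i < L.length) → ∀ b, b < L.length →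
    is.foldl (fun best i => if glen L i > glen L best then i else best) b < L.length := by
  intro is
  induction is with
  | nil => intro _ b hb; exact hb
  | cons i is ih =>
      intro hmem b hb
      simp only [List.foldl_cons]
      by_cases hc : glen L i > glen L b
      · rw [if_pos hc]
        exact ih (fun x hx => hmem x (by simp [hx])) i (hmem i (by simp))
      · rw [if_neg hc]
        exact ih (fun x hx => hmem x (by simp [hx])) b hb

-- ===== VERDICT (by name: the statement is the Claim_ definition above) =====
theorem solution_spec : Claim_equal_solution := by
  unfold Claim_equal_solution Spec_solution
  intro word _
  show solution word = solution_alt word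
  rw [solution, solution_alt]
  simp only
  by_cases h1 : word.toList.length = 1
  · rw [if_pos h1, if_pos (by omega)]
  · rw [if_neg h1]
    by_cases h0 : word.toList.length = 0
    · rw [if_pos (by omega), h0]
      simp only [Nat.zero_sub, List.range_zero, List.foldl_nil]
      have : word = "" := String.toList_eq_nil_iff.mp (List.length_eq_zero_iff.mp h0)
      rw [this]
    · have hn2 : 2 ≤ word.toList.length := by omega
      rw [if_neg (by omega : ¬ word.toList.length ≤ 1)]
      set L := word.toList with hLdef
      set n := L.length with hndef
      have hfun : (fun (sol : List Char) i =>
          if (innerA L i).2.length > sol.length then (innerA L i).2 else sol)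
          = (fun sol i => if (chainChars L i).length > sol.length then chainChars L i else sol) := by
        funext sol i
        rw [innerA_eq_chainChars L (L.length - i) i rfl]
      rw [hfun]
      have hmem : ∀ i ∈ List.range' 1 (n - 2), i < n := by
        intro i hi
        have := List.mem_range'.mp hi
        omega
      have hbest := bestfold_eq L (List.range' 1 (n - 2)) hmem 0 (by omega)
      rw [hbest]
      set best := (List.range' 1 (n - 2)).foldl
        (fun best i => if glen L i > glen L best then i else best) 0 with hbdef
      have hbestlt : best < n := bestfold_lt L _ hmem 0 (by omega)
      rw [rebuildB_eq L n best hbestlt (by omega)]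
      -- A side: peel the first index 0, whose candidate replaces the empty accumulator
      rw [List.range_eq_range', show n - 1 = (n - 2) + 1 from by omega, List.range'_succ,
        List.foldl_cons]
      rw [if_pos (by simpa using List.length_pos_iff.mpr (chainChars_ne_nil L 0))]
      rw [select_eq L (List.range' 1 (n - 2)) 0]
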